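-- pv_equiv track=rewrite | github.com/nguyenhien7268-ship-it/git1 | logic/de_utils.py | get_set_name_of_number
-- ===== SOURCE A (Python) =====
-- BO_SO_DE = {
--     # --- 5 Bộ Kép (4 số/bộ) ---
--     "00": ["00", "55", "05", "50"],
--     "11": ["11", "66", "16", "61"],
--     "22": ["22", "77", "27", "72"],
--     "33": ["33", "88", "38", "83"],
--     "44": ["44", "99", "49", "94"],
--
--     # --- 10 Bộ Thường (8 số/bộ) ---
--     "01": ["01", "10", "06", "60", "51", "15", "56", "65"],
--     "02": ["02", "20", "07", "70", "52", "25", "57", "75"],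
--     "03": ["03", "30", "08", "80", "53", "35", "58", "85"],
--     "04": ["04", "40", "09", "90", "54", "45", "59", "95"],
--     "12": ["12", "21", "17", "71", "26", "62", "76", "67"],
--     "13": ["13", "31", "18", "81", "36", "63", "86", "68"],
--     "14": ["14", "41", "19", "91", "46", "64", "96", "69"],
--     "23": ["23", "32", "28", "82", "37", "73", "87", "78"],
--     "24": ["24", "42", "29", "92", "47", "74", "97", "79"],
--     "34": ["34", "43", "39", "93", "48", "84", "98", "89"]
-- }
--
-- def get_set_name_of_number(number_str):
--     """
--     Tìm tên bộ số đại diện từ một số đề.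
--
--     Args:
--         number_str: Một số dạng chuỗi (vd: "05", "50", "55")
--
--     Returns:
--         str: Tên đại diện của bộ đó (VD: "00" nếu thuộc 'Bo 00').
--              None nếu không tìm thấy.
--     """
--     if not number_str or len(number_str) < 2:
--         return None
--
--     # Đảm bảo số có 2 chữ số
--     number_str = number_str.zfill(2)
--     if len(number_str) > 2:
--         number_str = number_str[-2:]
--
--     # Tìm trong BO_SO_DE
--     for bo_name, nums in BO_SO_DE.items():
--         if number_str in nums:
--             return bo_name
--
--     return None
-- ===== SOURCE B (Python) =====
-- def get_set_name_of_number(number_str):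
--     if not number_str or len(number_str) < 2:
--         return None
--     a, b = number_str[-2], number_str[-1]
--     if a.isdigit() and b.isdigit():
--         x, y = int(a) % 5, int(b) % 5
--         return "%d%d" % (min(x, y), max(x, y))
--     return None
-- ===== Notes on version B (the rewrite author's own statement) =====
-- stated objective: alternative
-- what changed: Replaces the scan over the 15 BO_SO_DE lists with a closed-form rule: a two-digit number belongs to the set named by the sorted pair of its digits taken mod 5, so B checks the last two characters are digits and computes the name arithmetically.
import Mathlib
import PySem

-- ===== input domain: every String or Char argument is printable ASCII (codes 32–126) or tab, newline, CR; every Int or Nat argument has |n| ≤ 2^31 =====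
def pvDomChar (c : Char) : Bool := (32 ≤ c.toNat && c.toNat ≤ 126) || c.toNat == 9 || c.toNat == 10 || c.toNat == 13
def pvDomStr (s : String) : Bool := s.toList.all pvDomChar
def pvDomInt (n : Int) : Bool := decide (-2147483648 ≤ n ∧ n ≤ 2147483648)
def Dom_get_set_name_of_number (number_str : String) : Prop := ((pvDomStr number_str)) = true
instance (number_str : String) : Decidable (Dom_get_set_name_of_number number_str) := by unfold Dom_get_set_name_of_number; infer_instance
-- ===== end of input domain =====

-- B replaces A's scan over BO_SO_DE with a closed-form computation (set name = sorted pair of digits mod 5); same return value, no change in side effects.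

-- ===== PORT A =====
-- BO_SO_DE: the module-level dict, values kept as two-char lists (each number is a 2-char string)
def pvBoSoDe : List (String × List (List Char)) := [
  ("00", [['0','0'], ['5','5'], ['0','5'], ['5','0']]),
  ("11", [['1','1'], ['6','6'], ['1','6'], ['6','1']]),
  ("22", [['2','2'], ['7','7'], ['2','7'], ['7','2']]),
  ("33", [['3','3'], ['8','8'], ['3','8'], ['8','3']]),
  ("44", [['4','4'], ['9','9'], ['4','9'], ['9','4']]),
  ("01", [['0','1'], ['1','0'], ['0','6'], ['6','0'], ['5','1'], ['1','5'], ['5','6'], ['6','5']]),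
  ("02", [['0','2'], ['2','0'], ['0','7'], ['7','0'], ['5','2'], ['2','5'], ['5','7'], ['7','5']]),
  ("03", [['0','3'], ['3','0'], ['0','8'], ['8','0'], ['5','3'], ['3','5'], ['5','8'], ['8','5']]),
  ("04", [['0','4'], ['4','0'], ['0','9'], ['9','0'], ['5','4'], ['4','5'], ['5','9'], ['9','5']]),
  ("12", [['1','2'], ['2','1'], ['1','7'], ['7','1'], ['2','6'], ['6','2'], ['7','6'], ['6','7']]),
  ("13", [['1','3'], ['3','1'], ['1','8'], ['8','1'], ['3','6'], ['6','3'], ['8','6'], ['6','8']]),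
  ("14", [['1','4'], ['4','1'], ['1','9'], ['9','1'], ['4','6'], ['6','4'], ['9','6'], ['6','9']]),
  ("23", [['2','3'], ['3','2'], ['2','8'], ['8','2'], ['3','7'], ['7','3'], ['8','7'], ['7','8']]),
  ("24", [['2','4'], ['4','2'], ['2','9'], ['9','2'], ['4','7'], ['7','4'], ['9','7'], ['7','9']]),
  ("34", [['3','4'], ['4','3'], ['3','9'], ['9','3'], ['4','8'], ['8','4'], ['9','8'], ['8','9']])]

-- the 'for bo_name, nums in BO_SO_DE.items(): if number_str in nums: return bo_name' loop
def pvFindSet : List (String × List (List Char)) → List Char → Option String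
  | [], _ => none
  | (name, nums) :: rest, s => if nums.contains s then some name else pvFindSet rest s

def get_set_name_of_number (number_str : String) : Option String :=
  -- if not number_str or len(number_str) < 2: return None
  if PySem.Str.len number_str = 0 ∨ PySem.Str.len number_str < 2 then none
  else
    -- number_str = number_str.zfill(2)
    let s1 := (PySem.Str.zfill number_str 2).toList
    -- if len(number_str) > 2: number_str = number_str[-2:]
    let s2 := if 2 < (s1.length : Int) then PySem.List.slice s1 (some (-2)) none else s1
    pvFindSet pvBoSoDe s2

-- ===== PORT B =====
-- int(c) for a single digit char c (exact: guarded by isdigit below)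
def pvDigitInt (c : Char) : Int := (c.toNat : Int) - 48

def get_set_name_of_number_alt (number_str : String) : Option String :=
  if PySem.Str.len number_str = 0 ∨ PySem.Str.len number_str < 2 then none
  else
    match PySem.Str.pyGet? number_str (-2), PySem.Str.pyGet? number_str (-1) with
    | some a, some b =>
      if PySem.Chars.isdigit a && PySem.Chars.isdigit b then
        let x := PySem.Int.mod (pvDigitInt a) 5
        let y := PySem.Int.mod (pvDigitInt b) 5
        -- "%d%d" % (min(x,y), max(x,y)) — concatenation of the two decimal strings
        some (String.ofList ((PySem.Int.toStr (min x y)).toList ++ (PySem.Int.toStr (max x y)).toList))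
      else none
    | _, _ => none  -- unreachable: length ≥ 2 guarantees both indices exist

-- ===== PRECONDITION & SPEC =====
def Spec_get_set_name_of_number (number_str : String) (out : Option String) : Prop := out = get_set_name_of_number_alt number_str
instance (number_str : String) (out : Option String) : Decidable (Spec_get_set_name_of_number number_str out) := by unfold Spec_get_set_name_of_number; infer_instance

-- ===== CLAIM (what is proved, stated in full; the proofs are below) =====
def Claim_equal_get_set_name_of_number : Prop := ∀ (number_str : String), Dom_get_set_name_of_number number_str → Spec_get_set_name_of_number number_str (get_set_name_of_number number_str)

-- ===== LEMMAS AND PROOFS =====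

-- B's core computation, factored out on the two final characters
def pvPairB (a b : Char) : Option String :=
  if PySem.Chars.isdigit a && PySem.Chars.isdigit b then
    let x := PySem.Int.mod (pvDigitInt a) 5
    let y := PySem.Int.mod (pvDigitInt b) 5
    some (String.ofList ((PySem.Int.toStr (min x y)).toList ++ (PySem.Int.toStr (max x y)).toList))
  else none

theorem pv_digit_cases (c : Char) (h : PySem.Chars.isdigit c = true) :
    c = '0' ∨ c = '1' ∨ c = '2' ∨ c = '3' ∨ c = '4' ∨ c = '5' ∨ c = '6' ∨ c = '7' ∨ c = '8' ∨ c = '9' := by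
  simp only [PySem.Chars.isdigit, Bool.and_eq_true, decide_eq_true_eq, Char.le_def] at h
  obtain ⟨h1, h2⟩ := h
  have hv : c.toNat = 48 ∨ c.toNat = 49 ∨ c.toNat = 50 ∨ c.toNat = 51 ∨ c.toNat = 52 ∨ c.toNat = 53 ∨ c.toNat = 54 ∨ c.toNat = 55 ∨ c.toNat = 56 ∨ c.toNat = 57 := by
    have g1 := UInt32.le_iff_toNat_le.mp h1
    have g2 := UInt32.le_iff_toNat_le.mp h2
    have e0 : ('0':Char).val.toNat = 48 := by decide
    have e9 : ('9':Char).val.toNat = 57 := by decide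
    simp only [Char.toNat] at *; omega
  rcases hv with h|h|h|h|h|h|h|h|h|h <;>
    (rw [← Char.ofNat_toNat c, h]; decide)

theorem pv_nondigit_cases (c : Char) (h : PySem.Chars.isdigit c = false) :
    c ≠ '0' ∧ c ≠ '1' ∧ c ≠ '2' ∧ c ≠ '3' ∧ c ≠ '4' ∧ c ≠ '5' ∧ c ≠ '6' ∧ c ≠ '7' ∧ c ≠ '8' ∧ c ≠ '9' := by
  refine ⟨?_, ?_, ?_, ?_, ?_, ?_, ?_, ?_, ?_, ?_⟩ <;>
    (rintro rfl; exact absurd h (by decide))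

-- The scan of A over BO_SO_DE agrees with B's closed form on any two characters
theorem pv_pair_eq (c d : Char) : pvFindSet pvBoSoDe [c, d] = pvPairB c d := by
  by_cases hc : PySem.Chars.isdigit c = true
  · by_cases hd : PySem.Chars.isdigit d = true
    · rcases pv_digit_cases c hc with rfl|rfl|rfl|rfl|rfl|rfl|rfl|rfl|rfl|rfl <;>
        rcases pv_digit_cases d hd with rfl|rfl|rfl|rfl|rfl|rfl|rfl|rfl|rfl|rfl <;>
        decide
    · rw [Bool.not_eq_true] at hd
      obtain ⟨n0, n1, n2, n3, n4, n5, n6, n7, n8, n9⟩ := pv_nondigit_cases d hd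
      rcases pv_digit_cases c hc with rfl|rfl|rfl|rfl|rfl|rfl|rfl|rfl|rfl|rfl <;>
        simp [pvFindSet, pvBoSoDe, pvPairB, hd, n0, n1, n2, n3, n4, n5, n6, n7, n8, n9]
  · rw [Bool.not_eq_true] at hc
    obtain ⟨n0, n1, n2, n3, n4, n5, n6, n7, n8, n9⟩ := pv_nondigit_cases c hc
    simp [pvFindSet, pvBoSoDe, pvPairB, hc, n0, n1, n2, n3, n4, n5, n6, n7, n8, n9]

theorem pv_main (s : String) :
    get_set_name_of_number s = get_set_name_of_number_alt s := by
  unfold get_set_name_of_number get_set_name_of_number_alt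
  by_cases hlen : PySem.Str.len s = 0 ∨ PySem.Str.len s < 2
  · rw [if_pos hlen, if_pos hlen]
  · rw [if_neg hlen, if_neg hlen]
    have h2 : 2 ≤ s.toList.length := by
      rw [PySem.Str.len_eq] at hlen; omega
    -- the zfill is the identity (length already ≥ 2)
    have hz : (PySem.Str.zfill s 2).toList = s.toList := by
      rw [PySem.Str.toList_zfill]
      unfold PySem.Chars.zfill
      rw [if_pos (by exact_mod_cast h2)]
    -- the last two characters
    obtain ⟨c, d, hT⟩ : ∃ c d, s.toList.drop (s.toList.length - 2) = [c, d] := by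
      apply List.length_eq_two.mp
      rw [List.length_drop]; omega
    have hgc : s.toList[s.toList.length - 2]? = some c := by
      have := @List.getElem?_drop Char s.toList (s.toList.length - 2) 0
      rw [hT] at this; simpa using this.symm
    have hgd : s.toList[s.toList.length - 1]? = some d := by
      have := @List.getElem?_drop Char s.toList (s.toList.length - 2) 1
      rw [hT] at this
      have e1 : s.toList.length - 2 + 1 = s.toList.length - 1 := by omega
      rw [e1] at this; simpa using this.symm
    -- B side: the two negative lookups
    have hb2 : PySem.Str.pyGet? s (-2) = some c := by
      show PySem.List.pyGet? s.toList (-2) = some c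
      have : ((-2 : Int)) = -((2 : Nat) : Int) := by norm_num
      rw [this, PySem.List.pyGet?_neg_natCast s.toList 2 (by omega) h2, hgc]
    have hb1 : PySem.Str.pyGet? s (-1) = some d := by
      show PySem.List.pyGet? s.toList (-1) = some d
      have : ((-1 : Int)) = -((1 : Nat) : Int) := by norm_num
      rw [this, PySem.List.pyGet?_neg_natCast s.toList 1 (by omega) (by omega), hgd]
    -- A side: the string fed to the scan is those same two characters
    have hA : (if 2 < ((PySem.Str.zfill s 2).toList.length : Int) then
        PySem.List.slice (PySem.Str.zfill s 2).toList (some (-2)) none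
        else (PySem.Str.zfill s 2).toList) = [c, d] := by
      rw [hz]
      by_cases hgt : 2 < (s.toList.length : Int)
      · rw [if_pos hgt, PySem.List.slice_from_neg_ofNat s.toList 2 (by omega), hT]
      · rw [if_neg hgt]
        have : s.toList.length = 2 := by omega
        rw [← hT, this]
        simp
    rw [hb2, hb1]
    show pvFindSet pvBoSoDe (if 2 < ((PySem.Str.zfill s 2).toList.length : Int) then
        PySem.List.slice (PySem.Str.zfill s 2).toList (some (-2)) none
        else (PySem.Str.zfill s 2).toList) = pvPairB c d
    rw [hA]
    exact pv_pair_eq c d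

-- ===== VERDICT (by name: the statement is the Claim_ definition above) =====
theorem get_set_name_of_number_spec : Claim_equal_get_set_name_of_number := by
  intro s _
  unfold Spec_get_set_name_of_number
  exact pv_main s
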